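-- pv_equiv track=rewrite | github.com/DuckyDuckDo/AOC-2025 | Day 2/Day2.py | process_interval
-- ===== SOURCE A (Python) =====
-- def check_invalid(string):
--     """
--     Returns whether the first half of the string is equivalent to the second half
--     """
--     if len(string) % 2 != 0:
--         return False
--
--     return string[:len(string)//2] == string[len(string)//2:]
--
-- def build_sequence(string, substring):
--     """
--     Checks that we can build the original substring by concatenating together the substring
--     """
--     if len(string) % len(substring) != 0:
--         return False
--     return string == substring * (len(string) // len(substring))
--
-- def check_invalid2(string):
--     """
--     Finds sequences of lengths that evenly divide into the len of the string, concatenate them together and see if they get original nubmer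
--     """
--     n = len(string)
--     curr_substring = ""
--     # Only care about sequences up until the first half of the string
--     for i in range(n//2):
--         curr_substring += string[i]
--         # with current substring, check if we can build the full string
--         if build_sequence(string, curr_substring):
--             return True
--
--     return False
--
-- def process_interval(low, high):
--     """
--     Given an interval between low and high inclusive, process for invalid numbers and return the sum of them
--     """
--     sum_of_invalid1, sum_of_invalid2 = 0, 0
--     for num in range(int(low), int(high) + 1):
--         # Checks for part 1
--         if check_invalid(str(num)):
--             sum_of_invalid1 += num
--
--         # Checks for part 2
--         if check_invalid2(str(num)):
--             sum_of_invalid2 += num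
--
--     return sum_of_invalid1, sum_of_invalid2
-- ===== SOURCE B (Python) =====
-- def process_interval(low, high):
--     """
--     Instead of scanning every number in [low, high] and string-testing it,
--     enumerate the periodic numbers directly: a d-digit block b repeated k
--     times is the number b * (10**(d*k) - 1) // (10**d - 1).  For part 2 each
--     number is counted once, at its shortest block length (a number is
--     q-periodic iff it is divisible by rep(L, q) with a q-digit quotient).
--     """
--     lo, hi = int(low), int(high)
--     m = len(str(hi))
--
--     def rep(L, d):
--         return (10 ** L - 1) // (10 ** d - 1)
--
--     # part 1: two equal halves = a d-digit block repeated exactly twice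
--     sum1 = sum(b * rep(2 * d, d)
--                for d in range(1, m // 2 + 1)
--                for b in range(10 ** (d - 1), 10 ** d)
--                if lo <= b * rep(2 * d, d) <= hi)
--
--     # part 2: any block repeated >= 2 times, counted at its shortest block
--     sum2 = sum(b * rep(L, d)
--                for L in range(2, m + 1)
--                for d in range(1, L // 2 + 1) if L % d == 0
--                for b in range(10 ** (d - 1), 10 ** d)
--                if lo <= b * rep(L, d) <= hi
--                and all(b * rep(L, d) % rep(L, q) != 0
--                        or b * rep(L, d) // rep(L, q) < 10 ** (q - 1)
--                        for q in range(1, d) if L % q == 0))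
--
--     return (sum1, sum2)
-- ===== Notes on version B (the rewrite author's own statement) =====
-- stated objective: faster
-- what changed: Instead of scanning every number in [low, high] and string-testing it for periodicity, B enumerates the periodic numbers directly - each d-digit block b repeated k times is b*(10^(d*k)-1)//(10^d-1) - filters them to the interval, and for part 2 counts each number exactly once at its shortest block length via an arithmetic divisibility test instead of deduping.
import Mathlib
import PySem

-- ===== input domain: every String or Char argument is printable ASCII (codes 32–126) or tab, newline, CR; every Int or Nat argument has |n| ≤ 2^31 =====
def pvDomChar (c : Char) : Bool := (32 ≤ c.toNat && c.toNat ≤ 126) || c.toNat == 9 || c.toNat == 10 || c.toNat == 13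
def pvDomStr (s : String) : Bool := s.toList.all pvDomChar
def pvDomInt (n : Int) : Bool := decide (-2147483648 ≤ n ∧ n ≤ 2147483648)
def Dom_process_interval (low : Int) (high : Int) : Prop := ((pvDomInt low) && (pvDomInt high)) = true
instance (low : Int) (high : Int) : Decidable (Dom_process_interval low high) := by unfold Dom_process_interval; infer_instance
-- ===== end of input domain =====

-- B enumerates the periodic numbers directly (each d-digit block b repeated k times is
-- b * (10^(d*k)-1)/(10^d-1)), filters them to [low, high], and counts each part-2 number
-- once, at its shortest block length (an arithmetic divisibility test), instead of
-- scanning the whole interval and string-testing each number (objective: faster).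

-- ===== PORT A =====

-- Python `t * k` on strings (k ≤ 0 gives ""); exact hand port, used by build_sequence.
def strMul (t : List Char) (k : Int) : List Char := (List.replicate k.toNat t).flatten

def check_invalid (s : List Char) : Bool :=
  if PySem.Int.mod (PySem.List.len s) 2 != 0 then false
  else PySem.List.slice s none (some (PySem.Int.floordiv (PySem.List.len s) 2))
         == PySem.List.slice s (some (PySem.Int.floordiv (PySem.List.len s) 2)) none

def build_sequence (s t : List Char) : Bool :=
  if PySem.Int.mod (PySem.List.len s) (PySem.List.len t) != 0 then false
  else s == strMul t (PySem.Int.floordiv (PySem.List.len s) (PySem.List.len t))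

-- early `return True` is modelled by a found-flag that freezes the state
def check_invalid2 (s : List Char) : Bool :=
  ((PySem.List.pyRange 0 (PySem.Int.floordiv (PySem.List.len s) 2) 1).foldl
    (fun (p : List Char × Bool) i =>
      if p.2 then p
      else
        let c := p.1 ++ [PySem.List.pyGetD s i ' ']
        (c, build_sequence s c))
    ([], false)).2

def process_interval (low : Int) (high : Int) : List Int :=
  let p := (PySem.List.pyRange low (high + 1) 1).foldl
    (fun (acc : Int × Int) num =>
      let ds := PySem.Int.toChars num
      let a1 := if check_invalid ds then acc.1 + num else acc.1
      let a2 := if check_invalid2 ds then acc.2 + num else acc.2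
      (a1, a2))
    (0, 0)
  [p.1, p.2]

-- ===== PORT B =====

-- rep(L, d) = (10 ** L - 1) // (10 ** d - 1)
def repB (L d : Int) : Int := PySem.Int.floordiv (10 ^ L.toNat - 1) (10 ^ d.toNat - 1)

-- range(10 ** (d - 1), 10 ** d)
def blocksB (d : Int) : List Int := PySem.List.pyRange (10 ^ (d.toNat - 1)) (10 ^ d.toNat) 1

def process_interval_alt (low : Int) (high : Int) : List Int :=
  let m : Int := PySem.List.len (PySem.Int.toChars high)
  let sum1 := ((PySem.List.pyRange 1 (PySem.Int.floordiv m 2 + 1) 1).flatMap (fun d =>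
      ((blocksB d).map (fun b => b * repB (2*d) d)).filter
        (fun num => decide (low ≤ num) && decide (num ≤ high)))).sum
  let sum2 := ((PySem.List.pyRange 2 (m + 1) 1).flatMap (fun L =>
      ((PySem.List.pyRange 1 (PySem.Int.floordiv L 2 + 1) 1).filter
          (fun d => PySem.Int.mod L d == 0)).flatMap
        (fun d => ((blocksB d).map (fun b => b * repB L d)).filter
          (fun num => (decide (low ≤ num) && decide (num ≤ high)) &&
            ((PySem.List.pyRange 1 d 1).filter (fun q => PySem.Int.mod L q == 0)).all
              (fun q => (PySem.Int.mod num (repB L q) != 0) ||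
                decide (PySem.Int.floordiv num (repB L q) < 10 ^ (q.toNat - 1))))))).sum
  [sum1, sum2]

-- ===== PRECONDITION & SPEC =====
def Spec_process_interval (low : Int) (high : Int) (out : List Int) : Prop := out = process_interval_alt low high
instance (low : Int) (high : Int) (out : List Int) : Decidable (Spec_process_interval low high out) := by unfold Spec_process_interval; infer_instance

-- ===== CLAIM (what is proved, stated in full; the proofs are below) =====
def Claim_equal_process_interval : Prop := ∀ (low : Int) (high : Int), Dom_process_interval low high → Spec_process_interval low high (process_interval low high)

-- ===== LEMMAS AND PROOFS =====

-- § 1  generic periodicity of lists --------------------------------------------------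

/-- `x` is invariant under shifting by `d`. -/
def Shifty {α : Type} (d : Nat) (x : List α) : Prop :=
  ∀ i, i + d < x.length → x[i]? = x[i + d]?

theorem flatRep_getElem? {α : Type} (t : List α) (k j : Nat) (hj : j < k * t.length) :
    (List.replicate k t).flatten[j]? = t[j % t.length]? := by
  induction k generalizing j with
  | zero => omega
  | succ k ih =>
    have ht : 0 < t.length := by
      rcases Nat.eq_zero_or_pos t.length with h | h
      · rw [h, Nat.mul_zero] at hj; omega
      · exact h
    rw [List.replicate_succ, List.flatten_cons]
    by_cases hc : j < t.length
    · rw [List.getElem?_append_left hc, Nat.mod_eq_of_lt hc]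
    · push_neg at hc
      rw [List.getElem?_append_right hc]
      have h2 : j - t.length < k * t.length := by
        have := add_one_mul (k:Nat) t.length
        omega
      rw [ih _ h2]
      congr 1
      conv_rhs => rw [← Nat.sub_add_cancel hc]
      rw [Nat.add_mod_right]

theorem shifty_of_rep {α : Type} (x : List α) (d : Nat) (hd : 0 < d) (hdvd : d ∣ x.length)
    (h : x = (List.replicate (x.length / d) (x.take d)).flatten) : Shifty d x := by
  intro i hi
  have ht : (x.take d).length = d := by
    simp only [List.length_take]
    exact min_eq_left (Nat.le_of_dvd (by omega) hdvd)
  have hlen : x.length = x.length / d * d := (Nat.div_mul_cancel hdvd).symm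
  conv_lhs => rw [h]
  conv_rhs => rw [h]
  rw [flatRep_getElem? _ _ _ (by rw [ht]; omega), flatRep_getElem? _ _ _ (by rw [ht]; omega), ht]
  congr 1
  exact (Nat.add_mod_right i d).symm

theorem getElem?_mod_of_shifty {α : Type} (x : List α) (d : Nat) (hd : 0 < d)
    (h : Shifty d x) (j : Nat) (hj : j < x.length) : x[j]? = x[j % d]? := by
  induction j using Nat.strong_induction_on with
  | _ j ih =>
    by_cases hc : j < d
    · rw [Nat.mod_eq_of_lt hc]
    · push_neg at hc
      have h1 : (j - d) + d < x.length := by omega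
      have hs := h (j - d) h1
      have hje : j - d + d = j := by omega
      rw [hje] at hs
      rw [← hs, ih (j - d) (by omega) (by omega)]
      have hm : (j - d) % d = j % d := by
        conv_rhs => rw [← hje]
        rw [Nat.add_mod_right]
      rw [hm]

theorem rep_of_shifty {α : Type} (x : List α) (d : Nat) (hd : 0 < d) (hdvd : d ∣ x.length)
    (h : Shifty d x) : x = (List.replicate (x.length / d) (x.take d)).flatten := by
  rcases Nat.eq_zero_or_pos x.length with hn | hn
  · have : x = [] := List.eq_nil_of_length_eq_zero hn
    subst this; simp
  have hdn : d <= x.length := Nat.le_of_dvd hn hdvd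
  have htlen : (x.take d).length = d := by simp; omega
  apply List.ext_getElem?
  intro i
  by_cases hi : i < x.length
  · rw [flatRep_getElem? (x.take d) (x.length / d) i
      (by rw [htlen, Nat.div_mul_cancel hdvd]; exact hi)]
    rw [getElem?_mod_of_shifty x d hd h i hi, htlen]
    have hmd : i % d < d := Nat.mod_lt _ hd
    rw [List.getElem?_take_of_lt hmd]
  · push_neg at hi
    rw [List.getElem?_eq_none (by omega), List.getElem?_eq_none]
    simp [List.length_flatten, htlen, Nat.div_mul_cancel hdvd]
    omega

theorem shifty_reverse {α : Type} (x : List α) (d : Nat) (h : Shifty d x) :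
    Shifty d x.reverse := by
  intro i hi
  rw [List.length_reverse] at hi
  have h1 : x.length - 1 - (i + d) + d < x.length := by omega
  have := h _ h1
  rw [List.getElem?_reverse (by omega), List.getElem?_reverse (by omega)]
  rw [show x.length - 1 - (i + d) + d = x.length - 1 - i by omega] at this
  exact this.symm

theorem shifty_map {α β : Type} (f : α → β) (x : List α) (d : Nat) (h : Shifty d x) :
    Shifty d (x.map f) := by
  intro i hi
  rw [List.length_map] at hi
  rw [List.getElem?_map, List.getElem?_map, h i hi]

theorem shifty_of_shifty_map {α β : Type} (f : α → β) (x : List α) (d : Nat)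
    (hinj : ∀ a ∈ x, ∀ b ∈ x, f a = f b → a = b) (h : Shifty d (x.map f)) : Shifty d x := by
  intro i hi
  have hi' : i < x.length := by omega
  have hmm := h i (by rwa [List.length_map])
  rw [List.getElem?_map, List.getElem?_map, List.getElem?_eq_getElem hi',
    List.getElem?_eq_getElem hi] at hmm
  simp only [Option.map_some, Option.some.injEq] at hmm
  rw [List.getElem?_eq_getElem hi', List.getElem?_eq_getElem hi]
  exact congrArg some (hinj _ (List.getElem_mem _) _ (List.getElem_mem _) hmm)

-- § 2  decimal digits ----------------------------------------------------------------

theorem digitChar_inj (a b : Nat) (ha : a < 10) (hb : b < 10)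
    (h : Nat.digitChar a = Nat.digitChar b) : a = b := by
  interval_cases a <;> interval_cases b <;> simp_all [Nat.digitChar]

theorem digitChar_ne_dash (a : Nat) (ha : a < 10) : Nat.digitChar a ≠ '-' := by
  interval_cases a <;> simp [Nat.digitChar]

theorem toDigitsCore_eq (f n : Nat) (acc : List Char) (hn : n ≠ 0) (hf : n < 10 ^ f) :
    Nat.toDigitsCore 10 f n acc = ((Nat.digits 10 n).map Nat.digitChar).reverse ++ acc := by
  induction f generalizing n acc with
  | zero => simp at hf; omega
  | succ f ih =>
    rw [Nat.toDigitsCore]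
    have hdig : Nat.digits 10 n = n % 10 :: Nat.digits 10 (n / 10) :=
      Nat.digits_def' (by norm_num) (by omega)
    by_cases hz : n / 10 = 0
    · have : Nat.digits 10 (n / 10) = [] := by rw [hz]; simp
      simp [hz, hdig, this]
    · have hlt : n / 10 < 10 ^ f := by
        rw [Nat.div_lt_iff_lt_mul (by norm_num)]
        calc n < 10 ^ (f + 1) := hf
          _ = 10 ^ f * 10 := by ring
      simp only [hz, if_false]
      rw [ih (n / 10) _ hz hlt, hdig]
      simp

theorem toChars_pos (num : Int) (h : 0 < num) :
    PySem.Int.toChars num = ((Nat.digits 10 num.toNat).map Nat.digitChar).reverse := by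
  have hnl : ¬ num < 0 := by omega
  have hn0 : num.toNat ≠ 0 := by omega
  rw [PySem.Int.toChars, if_neg hnl, Nat.toDigits,
    toDigitsCore_eq _ _ _ hn0 (lt_of_lt_of_le (Nat.lt_pow_self (by norm_num))
      (Nat.pow_le_pow_right (by norm_num) (by omega)))]
  simp

theorem toChars_neg (num : Int) (h : num < 0) :
    PySem.Int.toChars num = '-' :: ((Nat.digits 10 num.natAbs).map Nat.digitChar).reverse := by
  have hn0 : num.natAbs ≠ 0 := by omega
  rw [PySem.Int.toChars, if_pos (by omega), Nat.toDigits,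
    toDigitsCore_eq _ _ _ hn0 (lt_of_lt_of_le (Nat.lt_pow_self (by norm_num))
      (Nat.pow_le_pow_right (by norm_num) (by omega)))]
  simp

theorem digits_len_eq_iff (b d : Nat) (hd : 1 ≤ d) (hb : b ≠ 0) :
    (Nat.digits 10 b).length = d ↔ 10 ^ (d - 1) ≤ b ∧ b < 10 ^ d := by
  have h1 := Nat.digits_length_le_iff (b := 10) (by norm_num) b (k := d)
  have h2 := Nat.digits_length_le_iff (b := 10) (by norm_num) b (k := d - 1)
  omega

-- § 3  repunit blocks ----------------------------------------------------------------

/-- `repN d k = 1 + 10^d + … + 10^(d(k-1))` (the number `(10^(dk)-1)/(10^d-1)`). -/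
def repN (d : Nat) : Nat → Nat
  | 0 => 0
  | k + 1 => 1 + 10 ^ d * repN d k

theorem repN_geom (d k : Nat) : ((10:Int) ^ d - 1) * (repN d k : Int) = 10 ^ (d * k) - 1 := by
  induction k with
  | zero => simp [repN]
  | succ k ih =>
    have : (10:Int) ^ (d * (k+1)) = 10 ^ d * 10 ^ (d * k) := by
      rw [← pow_add]; ring_nf
    simp only [repN, this]
    push_cast
    calc ((10:Int)^d - 1) * (1 + 10^d * (repN d k : Int))
        = (10^d - 1) + 10^d * (((10:Int)^d - 1) * (repN d k : Int)) := by ring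
      _ = (10^d - 1) + 10^d * ((10:Int)^(d*k) - 1) := by rw [ih]
      _ = 10^d * 10^(d*k) - 1 := by ring

theorem repB_eq (d k : Nat) (hd : 1 ≤ d) :
    repB ((d * k : Nat) : Int) ((d : Nat) : Int) = ((repN d k : Nat) : Int) := by
  have hpos : (0:Int) < 10 ^ d - 1 := by
    have : (10:Int) ^ 1 ≤ 10 ^ d := pow_le_pow_right₀ (by norm_num) hd
    simp at this; omega
  rw [repB, Int.toNat_natCast, Int.toNat_natCast,
    PySem.Int.floordiv_eq_ediv_of_pos hpos, ← repN_geom d k,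
    mul_comm, Int.mul_ediv_cancel _ (by omega)]

theorem repN_pos (d k : Nat) (hk : 1 ≤ k) : 0 < repN d k := by
  cases k with
  | zero => omega
  | succ k => unfold repN; positivity

theorem digits_block_rep (b d k : Nat) (hb : b ≠ 0) (hlen : (Nat.digits 10 b).length = d)
    (hk : 1 ≤ k) :
    Nat.digits 10 (b * repN d k) = (List.replicate k (Nat.digits 10 b)).flatten := by
  induction k with
  | zero => omega
  | succ k ih =>
    cases Nat.eq_zero_or_pos k with
    | inl hk0 =>
      subst hk0
      show Nat.digits 10 (b * (1 + 10 ^ d * repN d 0)) = _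
      simp [repN]
    | inr hk1 =>
      have step : b * repN d (k + 1) = b + 10 ^ d * (b * repN d k) := by
        show b * (1 + 10 ^ d * repN d k) = _
        ring
      have happ := Nat.digits_append_digits (b := 10) (n := b) (m := b * repN d k) (by norm_num)
      rw [hlen] at happ
      rw [step, ← happ, ih hk1, List.replicate_succ, List.flatten_cons]

theorem ofDigits_flatten (B : List Nat) (d k : Nat) (hlen : B.length = d) :
    Nat.ofDigits 10 ((List.replicate k B).flatten) = Nat.ofDigits 10 B * repN d k := by
  induction k with
  | zero => simp [repN]
  | succ k ih =>
    rw [List.replicate_succ, List.flatten_cons, Nat.ofDigits_append, ih, hlen]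
    show _ = Nat.ofDigits 10 B * (1 + 10 ^ d * repN d k)
    ring

-- § 4  number-level characterisation --------------------------------------------------

theorem take_flatten_rep {α : Type} (B : List α) (k : Nat) (hk : 1 ≤ k) :
    ((List.replicate k B).flatten).take B.length = B := by
  cases k with
  | zero => omega
  | succ k => rw [List.replicate_succ, List.flatten_cons, List.take_left]

theorem per_of_gen (b d k : Nat) (hd : 1 ≤ d) (hk : 1 ≤ k)
    (hb1 : 10 ^ (d - 1) ≤ b) (hb2 : b < 10 ^ d) :
    (Nat.digits 10 (b * repN d k)).length = d * k ∧ Shifty d (Nat.digits 10 (b * repN d k)) := by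
  have hb0 : b ≠ 0 := by
    have : 0 < 10 ^ (d - 1) := by positivity
    omega
  have hlen : (Nat.digits 10 b).length = d := (digits_len_eq_iff b d hd hb0).mpr ⟨hb1, hb2⟩
  have hrep := digits_block_rep b d k hb0 hlen hk
  have hxlen : (Nat.digits 10 (b * repN d k)).length = d * k := by
    rw [hrep]
    simp [List.length_flatten, hlen, Nat.mul_comm]
  refine ⟨hxlen, ?_⟩
  apply shifty_of_rep _ d (by omega) (by rw [hxlen]; exact Dvd.intro k rfl)
  have htake : (Nat.digits 10 (b * repN d k)).take d = Nat.digits 10 b := by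
    conv_lhs => rw [hrep, ← hlen]
    exact take_flatten_rep _ k hk
  rw [htake, hxlen, Nat.mul_div_cancel_left k (by omega), ← hrep]

theorem gen_of_per (num d : Nat) (hnum : num ≠ 0) (hd : 1 ≤ d)
    (hdvd : d ∣ (Nat.digits 10 num).length) (hper : Shifty d (Nat.digits 10 num)) :
    ∃ b, 10 ^ (d - 1) ≤ b ∧ b < 10 ^ d ∧ num = b * repN d ((Nat.digits 10 num).length / d) := by
  have hn0 : Nat.digits 10 num ≠ [] := Nat.digits_ne_nil_iff_ne_zero.mpr hnum
  have hn : 0 < (Nat.digits 10 num).length := List.length_pos_of_ne_nil hn0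
  have hdn : d ≤ (Nat.digits 10 num).length := Nat.le_of_dvd hn hdvd
  have hrep := rep_of_shifty (Nat.digits 10 num) d hd hdvd hper
  have htlen : ((Nat.digits 10 num).take d).length = d := by simp; omega
  have htne : (Nat.digits 10 num).take d ≠ [] := by
    intro h; rw [h] at htlen; simp at htlen; omega
  -- the leading digit of the block equals the leading digit of num, hence ≠ 0
  have hlast : ∀ h : (Nat.digits 10 num).take d ≠ [], ((Nat.digits 10 num).take d).getLast h ≠ 0 := by
    intro h
    obtain ⟨m, hm⟩ := id hdvd
    have hm1 : 1 ≤ m := by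
      rcases Nat.eq_zero_or_pos m with rfl | hp
      · rw [Nat.mul_zero] at hm; omega
      · exact hp
    have hmod : ((Nat.digits 10 num).length - 1) % d = d - 1 := by
      obtain ⟨m', rfl⟩ : ∃ m', m = m' + 1 := ⟨m - 1, by omega⟩
      have hsub : (Nat.digits 10 num).length - 1 = d * m' + (d - 1) := by
        have : (Nat.digits 10 num).length = d * m' + d := by rw [hm]; ring
        omega
      rw [hsub, Nat.mul_add_mod]
      exact Nat.mod_eq_of_lt (by omega)
    have h2 := getElem?_mod_of_shifty (Nat.digits 10 num) d hd hper
      ((Nat.digits 10 num).length - 1) (by omega)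
    rw [hmod] at h2
    have e0 : ((Nat.digits 10 num).take d)[((Nat.digits 10 num).take d).length - 1]?
        = (Nat.digits 10 num)[d - 1]? := by
      rw [htlen, List.getElem?_take_of_lt (by omega)]
    have hv : ((Nat.digits 10 num).take d).getLast h = (Nat.digits 10 num).getLast hn0 := by
      rw [List.getLast_eq_getElem, List.getLast_eq_getElem]
      have h3 := e0.trans h2.symm
      rw [List.getElem?_eq_getElem (by rw [htlen]; omega),
        List.getElem?_eq_getElem (by omega)] at h3
      exact Option.some.inj h3
    rw [hv]
    exact Nat.getLast_digit_ne_zero 10 hnum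
  have hdig : Nat.digits 10 (Nat.ofDigits 10 ((Nat.digits 10 num).take d)) = (Nat.digits 10 num).take d :=
    Nat.digits_ofDigits 10 (by norm_num) _
      (fun l hl => Nat.digits_lt_base (by norm_num) (List.mem_of_mem_take hl)) hlast
  have hb0 : Nat.ofDigits 10 ((Nat.digits 10 num).take d) ≠ 0 := by
    intro h0
    rw [h0] at hdig
    exact htne (by simpa using hdig.symm)
  refine ⟨Nat.ofDigits 10 ((Nat.digits 10 num).take d), ?_, ?_, ?_⟩
  · exact ((digits_len_eq_iff _ d hd hb0).mp (by rw [hdig, htlen])).1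
  · exact ((digits_len_eq_iff _ d hd hb0).mp (by rw [hdig, htlen])).2
  · conv_lhs => rw [← Nat.ofDigits_digits 10 num]
    conv_lhs => rw [hrep]
    exact ofDigits_flatten _ d _ htlen

-- § 5  A's checks, characterised ------------------------------------------------------

theorem bs_rep (s : List Char) (d : Nat) (hd : 1 ≤ d) (hdn : d ≤ s.length) :
    build_sequence s (s.take d)
      = (decide (d ∣ s.length) && decide (s = (List.replicate (s.length / d) (s.take d)).flatten)) := by
  have htlen : (s.take d).length = d := by simp; omega
  unfold build_sequence strMul
  simp only [PySem.List.len_eq, htlen, PySem.Int.mod_natCast, PySem.Int.floordiv_natCast,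
    Int.toNat_natCast]
  by_cases hmod : s.length % d = 0
  · have hdvd : d ∣ s.length := Nat.dvd_of_mod_eq_zero hmod
    have hc : ((s.length % d : Nat) : Int) = 0 := by exact_mod_cast hmod
    simp only [hc, bne_self_eq_false, Bool.false_eq_true, if_false, hdvd, decide_true,
      Bool.true_and]
    rw [Bool.eq_iff_iff]
    simp [beq_iff_eq]
  · have hdvd : ¬ d ∣ s.length := fun h => hmod (Nat.mod_eq_zero_of_dvd h)
    have hc : ((s.length % d : Nat) : Int) ≠ 0 := by exact_mod_cast hmod
    simp [hc, hdvd]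
    intro hdd
    exact absurd (Int.natCast_dvd_natCast.mp hdd) hdvd

theorem ci2_fold (s : List Char) (m : Nat) (hm : m ≤ s.length) :
    ((PySem.List.pyRange 0 (m:Int) 1).foldl
      (fun (p : List Char × Bool) i =>
        if p.2 then p
        else
          let c := p.1 ++ [PySem.List.pyGetD s i ' ']
          (c, build_sequence s c))
      ([], false)).2 = (List.range m).any (fun j => build_sequence s (s.take (j+1)))
    ∧ ((((PySem.List.pyRange 0 (m:Int) 1).foldl
      (fun (p : List Char × Bool) i =>
        if p.2 then p
        else
          let c := p.1 ++ [PySem.List.pyGetD s i ' ']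
          (c, build_sequence s c))
      ([], false)).2 = false) →
      ((PySem.List.pyRange 0 (m:Int) 1).foldl
      (fun (p : List Char × Bool) i =>
        if p.2 then p
        else
          let c := p.1 ++ [PySem.List.pyGetD s i ' ']
          (c, build_sequence s c))
      ([], false)).1 = s.take m) := by
  induction m with
  | zero => simp [PySem.List.pyRange]
  | succ m ih =>
    obtain ⟨ih1, ih2⟩ := ih (by omega)
    have hcast : ((m + 1 : Nat) : Int) = (m : Int) + 1 := by push_cast; ring
    rw [hcast, PySem.List.pyRange_one_succ_right (by positivity), List.foldl_append]
    simp only [List.foldl_cons, List.foldl_nil]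
    set F := ((PySem.List.pyRange 0 (m:Int) 1).foldl
      (fun (p : List Char × Bool) i =>
        if p.2 then p
        else
          let c := p.1 ++ [PySem.List.pyGetD s i ' ']
          (c, build_sequence s c))
      ([], false)) with hF
    by_cases hfound : F.2 = true
    · simp only [hfound, if_true]
      constructor
      · have hr : ((List.range m).any fun j => build_sequence s (s.take (j+1))) = true :=
          ih1 ▸ hfound
        simp [List.range_succ, hr]
      · intro h
        exact Bool.noConfusion h
    · have hf2 : F.2 = false := by revert hfound; cases F.2 <;> simp
      have hcurr : F.1 = s.take m := ih2 hf2
      have hget : PySem.List.pyGetD s (m:Int) ' ' = s.getD m ' ' := by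
        simp [PySem.List.pyGetD_natCast]
      have hmlt : m < s.length := by omega
      have htk : s.take m ++ [s.getD m ' '] = s.take (m+1) := by
        rw [List.getD_eq_getElem s ' ' hmlt, List.take_add_one, List.getElem?_eq_getElem hmlt]
        rfl
      simp only [hf2, Bool.false_eq_true, if_false, hcurr, hget, htk]
      constructor
      · rw [List.range_succ, List.any_append, ← ih1, hf2]
        simp
      · intro _
        simp

theorem ci2_iff (s : List Char) : check_invalid2 s = true ↔
    ∃ d : Nat, 1 ≤ d ∧ d ≤ s.length / 2 ∧ d ∣ s.length ∧
      s = (List.replicate (s.length / d) (s.take d)).flatten := by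
  unfold check_invalid2
  have hcast : PySem.Int.floordiv (PySem.List.len s) 2 = ((s.length / 2 : Nat) : Int) := by
    rw [PySem.List.len_eq]
    exact_mod_cast PySem.Int.floordiv_natCast s.length 2
  rw [hcast, (ci2_fold s (s.length / 2) (by omega)).1, List.any_eq_true]
  constructor
  · rintro ⟨j, hj, hb⟩
    rw [List.mem_range] at hj
    rw [bs_rep s (j+1) (by omega) (by omega)] at hb
    simp only [Bool.and_eq_true, decide_eq_true_eq] at hb
    exact ⟨j+1, by omega, by omega, hb.1, hb.2⟩
  · rintro ⟨d, hd1, hd2, hdvd, heq⟩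
    refine ⟨d-1, List.mem_range.mpr (by omega), ?_⟩
    rw [show d-1+1 = d by omega, bs_rep s d hd1 (by omega)]
    simp only [Bool.and_eq_true, decide_eq_true_eq]
    exact ⟨hdvd, heq⟩

theorem ci1_iff (s : List Char) : check_invalid s = true ↔
    2 ∣ s.length ∧ s.take (s.length / 2) = s.drop (s.length / 2) := by
  unfold check_invalid
  rw [show (2:Int) = ((2:Nat):Int) by norm_num]
  simp only [PySem.List.len_eq, PySem.Int.mod_natCast, PySem.Int.floordiv_natCast,
    PySem.List.slice_to_natCast, PySem.List.slice_from_natCast]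
  by_cases he : s.length % 2 = 0
  · have hi : ((s.length % 2 : Nat) : Int) = 0 := by exact_mod_cast he
    simp only [hi, bne_self_eq_false, Bool.false_eq_true, if_false, beq_iff_eq]
    constructor
    · exact fun h => ⟨Nat.dvd_of_mod_eq_zero he, h⟩
    · exact fun h => h.2
  · have hi : ((s.length % 2 : Nat) : Int) ≠ 0 := by exact_mod_cast he
    have : ¬ 2 ∣ s.length := fun h => he (Nat.mod_eq_zero_of_dvd h)
    simp [hi, this]
    intro hdd
    exact absurd (by exact_mod_cast hdd : 2 ∣ s.length) this

theorem half_iff_shifty {α : Type} (x : List α) (d : Nat) (hd : 0 < d) (hlen : x.length = 2*d) :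
    (x.take d = x.drop d) ↔ Shifty d x := by
  have hdvd : d ∣ x.length := ⟨2, by omega⟩
  have h2 : x.length / d = 2 := by
    rw [hlen, Nat.mul_div_assoc 2 dvd_rfl, Nat.div_self hd]
  have htlen : (x.take d).length = d := by simp [hlen]; omega
  have hfl : (List.replicate 2 (x.take d)).flatten = x.take d ++ x.take d := by
    simp [List.replicate_succ]
  constructor
  · intro h
    apply shifty_of_rep x d hd hdvd
    rw [h2, hfl]
    conv_lhs => rw [← List.take_append_drop d x, ← h]
  · intro h
    have hrep := rep_of_shifty x d hd hdvd h
    rw [h2, hfl] at hrep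
    have hdr := congrArg (List.drop d) hrep
    rw [List.drop_left' htlen] at hdr
    exact hdr.symm

theorem toChars_len_pos (num : Int) (h : 0 < num) :
    (PySem.Int.toChars num).length = (Nat.digits 10 num.toNat).length := by
  rw [toChars_pos num h]; simp

theorem no_dash (num : Int) (hneg : num < 0) (d : Nat) (hd : 0 < d)
    (hdlt : d < (PySem.Int.toChars num).length)
    (h : (PySem.Int.toChars num)[0]? = (PySem.Int.toChars num)[d]?) : False := by
  rw [toChars_neg num hneg] at h hdlt
  set tl := ((Nat.digits 10 num.natAbs).map Nat.digitChar).reverse with htl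
  have hlt : d - 1 < tl.length := by simp at hdlt ⊢; omega
  have hgd : ('-' :: tl)[d]? = tl[d-1]? := by
    rw [show d = (d-1)+1 by omega]
    exact List.getElem?_cons_succ ..
  rw [hgd, List.getElem?_cons_zero, List.getElem?_eq_getElem hlt] at h
  have hmem : '-' ∈ tl := (Option.some.inj h) ▸ List.getElem_mem _
  rw [htl, List.mem_reverse, List.mem_map] at hmem
  obtain ⟨a, ha, hfa⟩ := hmem
  have ha10 : a < 10 := Nat.digits_lt_base (by norm_num) ha
  exact digitChar_ne_dash a ha10 hfa

theorem sper_iff_dper (num : Int) (hpos : 0 < num) (d : Nat) :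
    Shifty d (PySem.Int.toChars num) ↔ Shifty d (Nat.digits 10 num.toNat) := by
  rw [toChars_pos num hpos]
  have hlt : ∀ a ∈ Nat.digits 10 num.toNat, a < 10 :=
    fun a ha => Nat.digits_lt_base (by norm_num) ha
  constructor
  · intro h
    have h1 := shifty_reverse _ _ h
    rw [List.reverse_reverse] at h1
    exact shifty_of_shifty_map _ _ _
      (fun a ha b hb hfe => digitChar_inj a b (hlt a ha) (hlt b hb) hfe) h1
  · intro h
    exact shifty_reverse _ _ (shifty_map _ _ _ h)

theorem key1 (num : Int) : check_invalid (PySem.Int.toChars num) = true ↔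
    0 < num ∧ 2 ∣ (Nat.digits 10 num.toNat).length ∧
      Shifty ((Nat.digits 10 num.toNat).length / 2) (Nat.digits 10 num.toNat) := by
  rcases lt_trichotomy num 0 with hneg | rfl | hpos
  · constructor
    · intro h
      exfalso
      rw [ci1_iff] at h
      obtain ⟨h2, heq⟩ := h
      have hn1 : 0 < (PySem.Int.toChars num).length := by
        rw [toChars_neg num hneg]; simp
      have hn2 : 2 ≤ (PySem.Int.toChars num).length := by omega
      have h0 : (PySem.Int.toChars num)[0]? = (PySem.Int.toChars num)[(PySem.Int.toChars num).length/2]? := by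
        have hh := congrArg (fun l => l[0]?) heq
        simp only at hh
        rwa [List.getElem?_take_of_lt (by omega), List.getElem?_drop, Nat.add_zero] at hh
      exact no_dash num hneg ((PySem.Int.toChars num).length/2) (by omega) (by omega) h0
    · rintro ⟨h, _⟩; omega
  · constructor
    · intro h; exact absurd h (by decide)
    · rintro ⟨h, _⟩; omega
  · rw [ci1_iff]
    have hlen := toChars_len_pos num hpos
    have hne : Nat.digits 10 num.toNat ≠ [] := Nat.digits_ne_nil_iff_ne_zero.mpr (by omega)
    have hn1 : 0 < (Nat.digits 10 num.toNat).length := List.length_pos_of_ne_nil hne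
    constructor
    · rintro ⟨h2, heq⟩
      rw [hlen] at h2
      have hd0 : 0 < (Nat.digits 10 num.toNat).length / 2 := by omega
      have hsh := (half_iff_shifty _ ((PySem.Int.toChars num).length/2)
        (by rw [hlen]; omega) (by rw [hlen]; omega)).mp heq
      rw [hlen] at hsh
      exact ⟨hpos, h2, (sper_iff_dper num hpos _).mp (by rw [← hlen] at hsh ⊢; exact hsh)⟩
    · rintro ⟨_, h2, hsh⟩
      refine ⟨by rw [hlen]; exact h2, ?_⟩
      have hsh' := (sper_iff_dper num hpos _).mpr hsh
      rw [← hlen] at h2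
      exact (half_iff_shifty _ ((PySem.Int.toChars num).length/2)
        (by omega) (by omega)).mpr (by rw [hlen]; exact hsh')

theorem key2 (num : Int) : check_invalid2 (PySem.Int.toChars num) = true ↔
    0 < num ∧ ∃ d : Nat, 1 ≤ d ∧ 2 * d ≤ (Nat.digits 10 num.toNat).length ∧
      d ∣ (Nat.digits 10 num.toNat).length ∧ Shifty d (Nat.digits 10 num.toNat) := by
  rcases lt_trichotomy num 0 with hneg | rfl | hpos
  · constructor
    · intro h
      exfalso
      rw [ci2_iff] at h
      obtain ⟨d, hd1, hd2, hdvd, heq⟩ := h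
      have hsh := shifty_of_rep (PySem.Int.toChars num) d (by omega) hdvd heq
      have h0 := hsh 0 (by omega)
      rw [Nat.zero_add] at h0
      exact no_dash num hneg d (by omega) (by omega) h0
    · rintro ⟨h, _⟩; omega
  · constructor
    · intro h; exact absurd h (by decide)
    · rintro ⟨h, _⟩; omega
  · rw [ci2_iff]
    have hlen := toChars_len_pos num hpos
    constructor
    · rintro ⟨d, hd1, hd2, hdvd, heq⟩
      rw [hlen] at hd2 hdvd
      refine ⟨hpos, d, hd1, by omega, hdvd, ?_⟩
      exact (sper_iff_dper num hpos d).mp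
        (shifty_of_rep _ d (by omega) (by rw [hlen]; exact hdvd) heq)
    · rintro ⟨_, d, hd1, hdle, hdvd, hsh⟩
      refine ⟨d, hd1, by rw [hlen]; omega, by rw [hlen]; exact hdvd, ?_⟩
      exact rep_of_shifty _ d (by omega) (by rw [hlen]; exact hdvd)
        ((sper_iff_dper num hpos d).mpr hsh)

-- § 6  both sides as sums over filtered lists ----------------------------------------

theorem fold_pair_eq (l : List Int) (f g : Int → Bool) (a b : Int) :
    l.foldl (fun (acc : Int × Int) x =>
      (if f x then acc.1 + x else acc.1, if g x then acc.2 + x else acc.2)) (a, b)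
    = (a + (l.filter f).sum, b + (l.filter g).sum) := by
  induction l generalizing a b with
  | nil => simp
  | cons x xs ih =>
    simp only [List.foldl_cons, List.filter_cons, ih]
    by_cases hf : f x <;> by_cases hg : g x <;>
      simp [hf, hg, Prod.ext_iff] <;> omega

theorem pyRange_pairwise (a b : Int) : (PySem.List.pyRange a b 1).Pairwise (· < ·) := by
  have H : ∀ n : Nat, ∀ a : Int, (b - a).toNat = n → (PySem.List.pyRange a b 1).Pairwise (· < ·) := by
    intro n
    induction n with
    | zero =>
      intro a ha
      have hnil : PySem.List.pyRange a b 1 = [] := by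
        apply List.eq_nil_iff_forall_not_mem.mpr
        intro x hx
        rw [PySem.List.mem_pyRange_one] at hx
        omega
      rw [hnil]
      exact List.Pairwise.nil
    | succ n ih =>
      intro a ha
      rw [PySem.List.pyRange_one_cons (by omega)]
      exact List.pairwise_cons.mpr
        ⟨fun x hx => by rw [PySem.List.mem_pyRange_one] at hx; omega, ih (a+1) (by omega)⟩
  exact H _ a rfl

theorem genQ_int (b d k : Nat) (hd : 1 ≤ d) (hk2 : 2 ≤ k)
    (hb1 : 10 ^ (d - 1) ≤ b) (hb2 : b < 10 ^ d) :
    check_invalid2 (PySem.Int.toChars ((b * repN d k : Nat) : Int)) = true ∧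
    (k = 2 → check_invalid (PySem.Int.toChars ((b * repN d k : Nat) : Int)) = true) ∧
    (Nat.digits 10 (b * repN d k)).length = d * k ∧ 0 < b * repN d k := by
  have hb0 : 0 < b := lt_of_lt_of_le (by positivity) hb1
  have hposN : 0 < b * repN d k := Nat.mul_pos hb0 (repN_pos d k (by omega))
  obtain ⟨hlen, hsh⟩ := per_of_gen b d k hd (by omega) hb1 hb2
  have hd2k : d * 2 ≤ d * k := Nat.mul_le_mul_left d hk2
  refine ⟨?_, ?_, hlen, hposN⟩
  · rw [key2]
    simp only [Int.toNat_natCast]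
    refine ⟨by exact_mod_cast hposN, d, hd, ?_, ?_, hsh⟩
    · rw [hlen]; omega
    · rw [hlen]; exact ⟨k, rfl⟩
  · intro hk
    subst hk
    rw [key1]
    simp only [Int.toNat_natCast]
    refine ⟨by exact_mod_cast hposN, by rw [hlen]; exact ⟨d, by ring⟩, ?_⟩
    rw [hlen, show d * 2 / 2 = d from by omega]
    exact hsh

theorem len_le_high (num high : Int) (h1 : 0 < num) (hnh : num ≤ high) :
    ((Nat.digits 10 num.toNat).length : Int) ≤ PySem.List.len (PySem.Int.toChars high) := by
  have hh : 0 < high := by omega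
  rw [PySem.List.len_eq, toChars_len_pos high hh]
  have hhlt := (Nat.digits_length_le_iff (b := 10) (by norm_num) high.toNat
    (k := (Nat.digits 10 high.toNat).length)).mp le_rfl
  have h2 := (Nat.digits_length_le_iff (b := 10) (by norm_num) num.toNat
    (k := (Nat.digits 10 high.toNat).length)).mpr (by omega)
  exact_mod_cast h2

theorem gen1_unpack (low high d num : Int) (hd : 1 ≤ d)
    (h : num ∈ ((blocksB d).map (fun b => b * repB (2*d) d)).filter
      (fun num => decide (low ≤ num) && decide (num ≤ high))) :
    low ≤ num ∧ num ≤ high ∧ check_invalid (PySem.Int.toChars num) = true ∧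
      (Nat.digits 10 num.toNat).length = d.toNat * 2 := by
  rw [List.mem_filter] at h
  obtain ⟨hmm, hrange⟩ := h
  rw [List.mem_map] at hmm
  obtain ⟨b, hbmem, hnum⟩ := hmm
  rw [blocksB, PySem.List.mem_pyRange_one] at hbmem
  simp only [Bool.and_eq_true, decide_eq_true_eq] at hrange
  have hdn1 : 1 ≤ d.toNat := by omega
  have hcast1 : ((10:Int) ^ (d.toNat - 1)) = ((10^(d.toNat-1) : Nat) : Int) := by push_cast; ring
  have hcast2 : ((10:Int) ^ d.toNat) = ((10^(d.toNat) : Nat) : Int) := by push_cast; ring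
  rw [hcast1] at hbmem
  rw [hcast2] at hbmem
  have hb0 : 0 < b := by
    have h10 : (0:Int) < ((10^(d.toNat-1) : Nat) : Int) := by positivity
    omega
  have hbn1 : 10^(d.toNat-1) ≤ b.toNat := by omega
  have hbn2 : b.toNat < 10^(d.toNat) := by omega
  have hrepb : repB (2*d) d = ((repN d.toNat 2 : Nat) : Int) := by
    have h0 := repB_eq d.toNat 2 hdn1
    have e1 : ((d.toNat*2 : Nat) : Int) = 2*d := by push_cast; omega
    have e2 : ((d.toNat : Nat) : Int) = d := by omega
    rw [e1, e2] at h0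
    exact h0
  have hnum' : num = ((b.toNat * repN d.toNat 2 : Nat) : Int) := by
    rw [← hnum, hrepb]
    have e2 : ((b.toNat : Nat) : Int) = b := by omega
    push_cast
    rw [e2]
  obtain ⟨hQ2, hQ1, hlen, hposN⟩ := genQ_int b.toNat d.toNat 2 hdn1 le_rfl hbn1 hbn2
  refine ⟨hrange.1, hrange.2, by rw [hnum']; exact hQ1 rfl, ?_⟩
  rw [hnum', Int.toNat_natCast]
  exact hlen

theorem mem_crux1 (low high num : Int) :
    (num ∈ (PySem.List.pyRange 1 (PySem.Int.floordiv (PySem.List.len (PySem.Int.toChars high)) 2 + 1) 1).flatMap (fun d =>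
      ((blocksB d).map (fun b => b * repB (2*d) d)).filter
        (fun num => decide (low ≤ num) && decide (num ≤ high)))) ↔
    (low ≤ num ∧ num < high + 1 ∧ check_invalid (PySem.Int.toChars num) = true) := by
  constructor
  · intro h
    rw [List.mem_flatMap] at h
    obtain ⟨d, hdmem, hmem⟩ := h
    rw [PySem.List.mem_pyRange_one] at hdmem
    obtain ⟨hl, hh, hq, -⟩ := gen1_unpack low high d num hdmem.1 hmem
    exact ⟨hl, by omega, hq⟩
  · rintro ⟨hlow, hhigh1, hQ⟩
    obtain ⟨hpos, h2, hsh⟩ := (key1 num).mp hQ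
    have hn0 : num.toNat ≠ 0 := by omega
    have hne : Nat.digits 10 num.toNat ≠ [] := Nat.digits_ne_nil_iff_ne_zero.mpr hn0
    have hn1 : 0 < (Nat.digits 10 num.toNat).length := List.length_pos_of_ne_nil hne
    have hn2 : 2 ≤ (Nat.digits 10 num.toNat).length := by omega
    have hdpos : 0 < (Nat.digits 10 num.toNat).length / 2 := by omega
    obtain ⟨bn, hb1, hb2, hval⟩ := gen_of_per num.toNat ((Nat.digits 10 num.toNat).length / 2)
      hn0 (by omega) ⟨2, by omega⟩ hsh
    have hgen : ∀ m : Nat, 0 < m → (2*m) / m = 2 := fun m hm => by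
      rw [Nat.mul_div_assoc 2 dvd_rfl, Nat.div_self hm]
    have hnd : (Nat.digits 10 num.toNat).length / ((Nat.digits 10 num.toNat).length / 2) = 2 := by
      obtain ⟨k, hk⟩ := h2
      have hk2 : (Nat.digits 10 num.toNat).length / 2 = k := by omega
      rw [hk2, hk, hgen k (by omega)]
    rw [hnd] at hval
    have hmle := len_le_high num high hpos (by omega)
    rw [List.mem_flatMap]
    refine ⟨(((Nat.digits 10 num.toNat).length / 2 : Nat) : Int), ?_, ?_⟩
    · rw [PySem.List.mem_pyRange_one]
      refine ⟨by exact_mod_cast hdpos, ?_⟩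
      have hh0 : 0 < high := by omega
      rw [PySem.List.len_eq, toChars_len_pos high hh0] at hmle ⊢
      have hfd : PySem.Int.floordiv (((Nat.digits 10 high.toNat).length : Nat) : Int) 2
          = (((Nat.digits 10 high.toNat).length / 2 : Nat) : Int) := by
        exact_mod_cast PySem.Int.floordiv_natCast (Nat.digits 10 high.toNat).length 2
      rw [hfd]
      omega
    · rw [List.mem_filter]
      constructor
      · rw [List.mem_map]
        refine ⟨((bn : Nat) : Int), ?_, ?_⟩
        · rw [blocksB, PySem.List.mem_pyRange_one, Int.toNat_natCast]
          constructor
          · calc (10:Int)^((Nat.digits 10 num.toNat).length / 2 - 1)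
                = ((10^((Nat.digits 10 num.toNat).length / 2 - 1) : Nat) : Int) := by push_cast; ring
              _ ≤ _ := by exact_mod_cast hb1
          · calc ((bn : Nat) : Int)
                < ((10^((Nat.digits 10 num.toNat).length / 2) : Nat) : Int) := by exact_mod_cast hb2
              _ = (10:Int)^((Nat.digits 10 num.toNat).length / 2) := by push_cast; ring
        · have h0 := repB_eq ((Nat.digits 10 num.toNat).length / 2) 2 (by omega)
          have e1 : ((((Nat.digits 10 num.toNat).length / 2)*2 : Nat) : Int)
              = 2*(((Nat.digits 10 num.toNat).length / 2 : Nat) : Int) := by push_cast; ring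
          rw [e1] at h0
          calc ((bn : Nat) : Int) * repB (2*(((Nat.digits 10 num.toNat).length / 2 : Nat) : Int))
                (((Nat.digits 10 num.toNat).length / 2 : Nat) : Int)
              = ((bn * repN ((Nat.digits 10 num.toNat).length / 2) 2 : Nat) : Int) := by
                rw [h0]; push_cast; ring
            _ = ((num.toNat : Nat) : Int) := by rw [← hval]
            _ = num := by omega
      · simp only [Bool.and_eq_true, decide_eq_true_eq]
        exact ⟨hlow, by omega⟩

theorem gen2_unpack (L d num : Int) (hL2 : 2 ≤ L) (hd1 : 1 ≤ d)
    (hd2 : d ≤ PySem.Int.floordiv L 2) (hdvd : PySem.Int.mod L d = 0)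
    (h : num ∈ (blocksB d).map (fun b => b * repB L d)) :
    0 < num ∧ check_invalid2 (PySem.Int.toChars num) = true ∧
      (Nat.digits 10 num.toNat).length = L.toNat ∧
      Shifty d.toNat (Nat.digits 10 num.toNat) := by
  rw [List.mem_map] at h
  obtain ⟨b, hbmem, hnum⟩ := h
  rw [blocksB, PySem.List.mem_pyRange_one] at hbmem
  have hdn1 : 1 ≤ d.toNat := by omega
  have hdvdI : d ∣ L := (PySem.Int.mod_eq_zero_iff_dvd L d).mp hdvd
  have hdvdN : d.toNat ∣ L.toNat := by
    have hc : ((d.toNat : Nat) : Int) ∣ ((L.toNat : Nat) : Int) := by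
      rw [show ((d.toNat : Nat) : Int) = d from by omega,
        show ((L.toNat : Nat) : Int) = L from by omega]
      exact hdvdI
    exact Int.natCast_dvd_natCast.mp hc
  have hfd : PySem.Int.floordiv L 2 = ((L.toNat/2 : Nat) : Int) := by
    have h0 := PySem.Int.floordiv_natCast L.toNat 2
    rw [show ((L.toNat : Nat) : Int) = L from by omega] at h0
    exact_mod_cast h0
  have hLk : d.toNat * (L.toNat / d.toNat) = L.toNat := Nat.mul_div_cancel' hdvdN
  have hk2 : 2 ≤ L.toNat / d.toNat := by
    have hdle : d.toNat ≤ L.toNat / 2 := by rw [hfd] at hd2; omega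
    have hL2d : 2*d.toNat ≤ L.toNat := by omega
    nlinarith [hLk, hdn1]
  have hcast1 : ((10:Int) ^ (d.toNat - 1)) = ((10^(d.toNat-1) : Nat) : Int) := by push_cast; ring
  have hcast2 : ((10:Int) ^ d.toNat) = ((10^(d.toNat) : Nat) : Int) := by push_cast; ring
  rw [hcast1] at hbmem
  rw [hcast2] at hbmem
  have hb0 : 0 < b := by
    have h10 : (0:Int) < ((10^(d.toNat-1) : Nat) : Int) := by positivity
    omega
  have hbn1 : 10^(d.toNat-1) ≤ b.toNat := by omega
  have hbn2 : b.toNat < 10^(d.toNat) := by omega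
  have hrepb : repB L d = ((repN d.toNat (L.toNat / d.toNat) : Nat) : Int) := by
    have h0 := repB_eq d.toNat (L.toNat / d.toNat) hdn1
    rw [show ((d.toNat * (L.toNat / d.toNat) : Nat) : Int) = L from by rw [hLk]; omega,
      show ((d.toNat : Nat) : Int) = d from by omega] at h0
    exact h0
  have hnum' : num = ((b.toNat * repN d.toNat (L.toNat / d.toNat) : Nat) : Int) := by
    rw [← hnum, hrepb]
    have e2 : ((b.toNat : Nat) : Int) = b := by omega
    push_cast
    rw [e2]
  obtain ⟨hQ2, -, hlen, hposN⟩ := genQ_int b.toNat d.toNat (L.toNat / d.toNat) hdn1 hk2 hbn1 hbn2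
  have hshd := (per_of_gen b.toNat d.toNat (L.toNat / d.toNat) hdn1 (by omega) hbn1 hbn2).2
  refine ⟨by rw [hnum']; exact_mod_cast hposN, by rw [hnum']; exact hQ2, ?_, ?_⟩
  · rw [hnum', Int.toNat_natCast, hlen, hLk]
  · rw [hnum', Int.toNat_natCast]
    exact hshd

theorem nat_least {P : Nat → Prop} (h : ∃ t, P t) : ∃ t, P t ∧ ∀ q < t, ¬ P q := by
  obtain ⟨t, ht⟩ := h
  induction t using Nat.strong_induction_on with
  | _ t ih =>
    by_cases hall : ∀ q < t, ¬ P q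
    · exact ⟨t, ht, hall⟩
    · push_neg at hall
      obtain ⟨q, hq, hPq⟩ := hall
      exact ih q hq hPq

theorem bool_true_of_not_false {b : Bool} (h : b ≠ false) : b = true := by
  cases b
  · exact absurd rfl h
  · rfl

theorem div_mul_self_eq (a m : Nat) (hm : 0 < m) : a * m / m = a := by
  rw [Nat.mul_div_assoc a dvd_rfl, Nat.div_self hm, Nat.mul_one]

theorem repN_lower (d k : Nat) (hk : 1 ≤ k) : 10^(d*(k-1)) ≤ repN d k := by
  induction k with
  | zero => omega
  | succ k ih =>
    rcases Nat.eq_zero_or_pos k with rfl | h1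
    · simp [repN]
    · obtain ⟨k', rfl⟩ : ∃ k', k = k'+1 := ⟨k-1, by omega⟩
      have hih := ih (by omega)
      have hstep : (10:Nat)^(d*(k'+1+1-1)) = 10^d * 10^(d*(k'+1-1)) := by
        rw [← pow_add]
        congr 1
        simp [Nat.succ_sub_one]
        ring
      calc (10:Nat)^(d*(k'+1+1-1)) = 10^d * 10^(d*(k'+1-1)) := hstep
        _ ≤ 10^d * repN d (k'+1) := Nat.mul_le_mul_left _ hih
        _ ≤ 1 + 10^d * repN d (k'+1) := by omega
        _ = repN d (k'+1+1) := rfl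

theorem per_iff_arith (num q k : Nat) (hq : 1 ≤ q) (hk : 1 ≤ k) (hnum : num ≠ 0)
    (hlen : (Nat.digits 10 num).length = q * k) :
    Shifty q (Nat.digits 10 num) ↔ (repN q k ∣ num ∧ 10^(q-1) ≤ num / repN q k) := by
  have hrpos : 0 < repN q k := repN_pos q k hk
  constructor
  · intro h
    obtain ⟨b, hb1, hb2, hval⟩ := gen_of_per num q hnum hq (by rw [hlen]; exact ⟨k, rfl⟩) h
    rw [hlen] at hval
    have hqk : q * k / q = k := by
      rw [Nat.mul_comm]; exact div_mul_self_eq k q (by omega)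
    rw [hqk] at hval
    refine ⟨⟨b, by rw [hval]; ring⟩, ?_⟩
    rw [hval, div_mul_self_eq b _ hrpos]
    exact hb1
  · rintro ⟨hdvd, hge⟩
    have hval : num = (num / repN q k) * repN q k := (Nat.div_mul_cancel hdvd).symm
    have hblt : num / repN q k < 10^q := by
      have h1 : num < 10^(q*k) :=
        (Nat.digits_length_le_iff (by norm_num) num).mp (le_of_eq hlen)
      have h2 : 10^(q*(k-1)) ≤ repN q k := repN_lower q k hk
      have h3 : (10:Nat)^(q*k) = 10^q * 10^(q*(k-1)) := by
        rw [← pow_add]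
        congr 1
        obtain ⟨k', rfl⟩ : ∃ k', k = k'+1 := ⟨k-1, by omega⟩
        simp [Nat.succ_sub_one]
        ring
      by_contra hc
      push_neg at hc
      have hmul : 10^q * 10^(q*(k-1)) ≤ (num / repN q k) * repN q k :=
        Nat.mul_le_mul hc h2
      omega
    obtain ⟨hlen2, hsh⟩ := per_of_gen (num / repN q k) q k hq hk hge hblt
    rw [← hval] at hsh
    exact hsh

theorem test_false_iff (num L q : Int) (hq1 : 1 ≤ q) (hnum : 0 < num) (hqL : q ∣ L) (hL2 : 2 ≤ L)
    (hlen : (Nat.digits 10 num.toNat).length = L.toNat) :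
    (((PySem.Int.mod num (repB L q) != 0) ||
      decide (PySem.Int.floordiv num (repB L q) < 10 ^ (q.toNat - 1))) = false)
    ↔ Shifty q.toNat (Nat.digits 10 num.toNat) := by
  have hqn1 : 1 ≤ q.toNat := by omega
  have hdvdN : q.toNat ∣ L.toNat := by
    have hc : ((q.toNat : Nat) : Int) ∣ ((L.toNat : Nat) : Int) := by
      rw [show ((q.toNat : Nat) : Int) = q from by omega,
        show ((L.toNat : Nat) : Int) = L from by omega]
      exact hqL
    exact_mod_cast hc
  have hqle : q.toNat ≤ L.toNat := Nat.le_of_dvd (by omega) hdvdN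
  have hk1 : 1 ≤ L.toNat / q.toNat := (Nat.one_le_div_iff (by omega)).mpr hqle
  have hLk : q.toNat * (L.toNat / q.toNat) = L.toNat := Nat.mul_div_cancel' hdvdN
  have hrepb : repB L q = ((repN q.toNat (L.toNat / q.toNat) : Nat) : Int) := by
    have h0 := repB_eq q.toNat (L.toNat / q.toNat) hqn1
    rw [show ((q.toNat * (L.toNat / q.toNat) : Nat) : Int) = L from by rw [hLk]; omega,
      show ((q.toNat : Nat) : Int) = q from by omega] at h0
    exact h0
  have hmodE : PySem.Int.mod num (repB L q)
      = ((num.toNat % repN q.toNat (L.toNat / q.toNat) : Nat) : Int) := by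
    conv_lhs => rw [hrepb, show num = ((num.toNat : Nat) : Int) from by omega]
    exact PySem.Int.mod_natCast _ _
  have hfdvE : PySem.Int.floordiv num (repB L q)
      = ((num.toNat / repN q.toNat (L.toNat / q.toNat) : Nat) : Int) := by
    conv_lhs => rw [hrepb, show num = ((num.toNat : Nat) : Int) from by omega]
    exact PySem.Int.floordiv_natCast _ _
  have hcast : ((10^(q.toNat - 1) : Nat) : Int) = (10:Int)^(q.toNat-1) := by push_cast; ring
  rw [Bool.or_eq_false_iff, bne_eq_false_iff_eq, decide_eq_false_iff_not, hmodE, hfdvE,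
    per_iff_arith num.toNat q.toNat (L.toNat / q.toNat) hqn1 hk1 (by omega) (by rw [hlen]; exact hLk.symm)]
  constructor
  · rintro ⟨h1, h2⟩
    refine ⟨Nat.dvd_of_mod_eq_zero (by exact_mod_cast h1), ?_⟩
    rw [not_lt, ← hcast] at h2
    exact_mod_cast h2
  · rintro ⟨h1, h2⟩
    refine ⟨by rw [Nat.mod_eq_zero_of_dvd h1]; simp, ?_⟩
    rw [not_lt, ← hcast]
    exact_mod_cast h2

theorem repB_pos' (L d : Int) (hL2 : 2 ≤ L) (hd1 : 1 ≤ d) (hdvd : PySem.Int.mod L d = 0) :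
    0 < repB L d := by
  have hdn1 : 1 ≤ d.toNat := by omega
  have hdvdI : d ∣ L := (PySem.Int.mod_eq_zero_iff_dvd L d).mp hdvd
  have hdvdN : d.toNat ∣ L.toNat := by
    have hc : ((d.toNat : Nat) : Int) ∣ ((L.toNat : Nat) : Int) := by
      rw [show ((d.toNat : Nat) : Int) = d from by omega,
        show ((L.toNat : Nat) : Int) = L from by omega]
      exact hdvdI
    exact_mod_cast hc
  have hqle := Nat.le_of_dvd (by omega : 0 < L.toNat) hdvdN
  have hk1 : 1 ≤ L.toNat / d.toNat := (Nat.one_le_div_iff (by omega)).mpr hqle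
  have hLk := Nat.mul_div_cancel' hdvdN
  have h0 := repB_eq d.toNat (L.toNat / d.toNat) hdn1
  rw [show ((d.toNat * (L.toNat / d.toNat) : Nat) : Int) = L from by rw [hLk]; omega,
    show ((d.toNat : Nat) : Int) = d from by omega] at h0
  rw [h0]
  exact_mod_cast repN_pos _ _ hk1

theorem mem_crux2 (low high num : Int) :
    (num ∈ (PySem.List.pyRange 2 (PySem.List.len (PySem.Int.toChars high) + 1) 1).flatMap (fun L =>
      ((PySem.List.pyRange 1 (PySem.Int.floordiv L 2 + 1) 1).filter
          (fun d => PySem.Int.mod L d == 0)).flatMap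
        (fun d => ((blocksB d).map (fun b => b * repB L d)).filter
          (fun num => (decide (low ≤ num) && decide (num ≤ high)) &&
            ((PySem.List.pyRange 1 d 1).filter (fun q => PySem.Int.mod L q == 0)).all
              (fun q => (PySem.Int.mod num (repB L q) != 0) ||
                decide (PySem.Int.floordiv num (repB L q) < 10 ^ (q.toNat - 1))))))) ↔
    (low ≤ num ∧ num < high + 1 ∧ check_invalid2 (PySem.Int.toChars num) = true) := by
  constructor
  · intro h
    rw [List.mem_flatMap] at h
    obtain ⟨L, hLmem, h⟩ := h
    rw [PySem.List.mem_pyRange_one] at hLmem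
    rw [List.mem_flatMap] at h
    obtain ⟨d, hdmem, h⟩ := h
    rw [List.mem_filter, PySem.List.mem_pyRange_one] at hdmem
    obtain ⟨⟨hd1, hd2'⟩, hdvdB⟩ := hdmem
    have hdvd' : PySem.Int.mod L d = 0 := by simpa using hdvdB
    rw [List.mem_filter] at h
    obtain ⟨hmm, hpred⟩ := h
    simp only [Bool.and_eq_true, decide_eq_true_eq] at hpred
    obtain ⟨hpos, hq, -, -⟩ := gen2_unpack L d num hLmem.1 hd1 (by omega) hdvd' hmm
    exact ⟨hpred.1.1, by omega, hq⟩
  · rintro ⟨hlow, hhigh1, hQ⟩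
    obtain ⟨hpos, d', hd1', h2d', hdvd', hsh'⟩ := (key2 num).mp hQ
    have hn0 : num.toNat ≠ 0 := by omega
    obtain ⟨d0, ⟨hd01, hd0dvd, hd0sh⟩, hmin⟩ := nat_least (P := fun t =>
      1 ≤ t ∧ t ∣ (Nat.digits 10 num.toNat).length ∧ Shifty t (Nat.digits 10 num.toNat))
      ⟨d', hd1', hdvd', hsh'⟩
    have hd0le : d0 ≤ d' := by
      by_contra hc
      push_neg at hc
      exact hmin d' hc ⟨hd1', hdvd', hsh'⟩
    have h2d0 : 2 * d0 ≤ (Nat.digits 10 num.toNat).length := by omega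
    obtain ⟨bn, hb1, hb2, hval⟩ := gen_of_per num.toNat d0 hn0 hd01 hd0dvd hd0sh
    have hLk : d0 * ((Nat.digits 10 num.toNat).length / d0) = (Nat.digits 10 num.toNat).length :=
      Nat.mul_div_cancel' hd0dvd
    have hmle := len_le_high num high hpos (by omega)
    rw [List.mem_flatMap]
    refine ⟨(((Nat.digits 10 num.toNat).length : Nat) : Int), ?_, ?_⟩
    · rw [PySem.List.mem_pyRange_one]
      constructor
      · have : 2 ≤ (Nat.digits 10 num.toNat).length := by omega
        exact_mod_cast this
      · omega
    · rw [List.mem_flatMap]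
      refine ⟨((d0 : Nat) : Int), ?_, ?_⟩
      · rw [List.mem_filter, PySem.List.mem_pyRange_one]
        refine ⟨⟨by exact_mod_cast hd01, ?_⟩, ?_⟩
        · have hfd : PySem.Int.floordiv (((Nat.digits 10 num.toNat).length : Nat) : Int) 2
              = (((Nat.digits 10 num.toNat).length / 2 : Nat) : Int) := by
            exact_mod_cast PySem.Int.floordiv_natCast (Nat.digits 10 num.toNat).length 2
          rw [hfd]
          have : d0 ≤ (Nat.digits 10 num.toNat).length / 2 := by omega
          omega
        · have hmz : PySem.Int.mod (((Nat.digits 10 num.toNat).length : Nat) : Int) ((d0 : Nat) : Int) = 0 := by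
            rw [PySem.Int.mod_natCast]
            have : (Nat.digits 10 num.toNat).length % d0 = 0 := Nat.mod_eq_zero_of_dvd hd0dvd
            simp [this]
          simp [hmz]
      · rw [List.mem_filter]
        refine ⟨?_, ?_⟩
        · rw [List.mem_map]
          refine ⟨((bn : Nat) : Int), ?_, ?_⟩
          · rw [blocksB, PySem.List.mem_pyRange_one, Int.toNat_natCast]
            constructor
            · calc (10:Int)^(d0 - 1) = ((10^(d0-1) : Nat) : Int) := by push_cast; ring
                _ ≤ _ := by exact_mod_cast hb1
            · calc ((bn : Nat) : Int) < ((10^d0 : Nat) : Int) := by exact_mod_cast hb2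
                _ = (10:Int)^d0 := by push_cast; ring
          · have h0 := repB_eq d0 ((Nat.digits 10 num.toNat).length / d0) hd01
            rw [show ((d0 * ((Nat.digits 10 num.toNat).length / d0) : Nat) : Int)
                = (((Nat.digits 10 num.toNat).length : Nat) : Int) from by rw [hLk]] at h0
            calc ((bn : Nat) : Int) * repB (((Nat.digits 10 num.toNat).length : Nat) : Int) ((d0 : Nat) : Int)
                = ((bn * repN d0 ((Nat.digits 10 num.toNat).length / d0) : Nat) : Int) := by
                  rw [h0]; push_cast; ring
              _ = ((num.toNat : Nat) : Int) := by rw [← hval]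
              _ = num := by omega
        · simp only [Bool.and_eq_true, decide_eq_true_eq, List.all_eq_true]
          refine ⟨⟨hlow, by omega⟩, ?_⟩
          intro q hqmem
          rw [List.mem_filter, PySem.List.mem_pyRange_one] at hqmem
          obtain ⟨⟨hq1, hqlt⟩, hqdvdB⟩ := hqmem
          have hqdvd : PySem.Int.mod (((Nat.digits 10 num.toNat).length : Nat) : Int) q = 0 := by
            simpa using hqdvdB
          have hqI : q ∣ (((Nat.digits 10 num.toNat).length : Nat) : Int) :=
            (PySem.Int.mod_eq_zero_iff_dvd _ _).mp hqdvd
          have hqN : q.toNat ∣ (Nat.digits 10 num.toNat).length := by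
            have hc : ((q.toNat : Nat) : Int) ∣ (((Nat.digits 10 num.toNat).length : Nat) : Int) := by
              rw [show ((q.toNat : Nat) : Int) = q from by omega]
              exact hqI
            exact_mod_cast hc
          have hnsh : ¬ Shifty q.toNat (Nat.digits 10 num.toNat) := by
            intro hsh
            exact hmin q.toNat (by omega) ⟨by omega, hqN, hsh⟩
          have hiff := test_false_iff num (((Nat.digits 10 num.toNat).length : Nat) : Int) q
            hq1 hpos hqI
            (by
              have : 2 ≤ (Nat.digits 10 num.toNat).length := by omega
              exact_mod_cast this)
            (by rw [Int.toNat_natCast])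
          exact bool_true_of_not_false (fun hf => hnsh (hiff.mp hf))

theorem nodup_crux1 (low high : Int) :
    ((PySem.List.pyRange 1 (PySem.Int.floordiv (PySem.List.len (PySem.Int.toChars high)) 2 + 1) 1).flatMap (fun d =>
      ((blocksB d).map (fun b => b * repB (2*d) d)).filter
        (fun num => decide (low ≤ num) && decide (num ≤ high)))).Nodup := by
  have hrepPos : ∀ d : Int, 1 ≤ d → 0 < repB (2*d) d := by
    intro d hd
    have hdn1 : 1 ≤ d.toNat := by omega
    have h0 := repB_eq d.toNat 2 hdn1
    rw [show ((d.toNat*2 : Nat) : Int) = 2*d from by push_cast; omega,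
      show ((d.toNat : Nat) : Int) = d from by omega] at h0
    rw [h0]
    exact_mod_cast repN_pos d.toNat 2 (by omega)
  rw [List.flatMap_def, List.nodup_flatten]
  constructor
  · intro l hl
    rw [List.mem_map] at hl
    obtain ⟨d, hdmem, rfl⟩ := hl
    rw [PySem.List.mem_pyRange_one] at hdmem
    apply List.Nodup.filter
    apply List.Nodup.map_on
    · intro b hb b' hb' he
      have hp := hrepPos d hdmem.1
      exact mul_right_cancel₀ (by omega) he
    · exact (pyRange_pairwise _ _).imp (fun {a b} => ne_of_lt)
  · rw [List.pairwise_map]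
    apply List.Pairwise.imp_of_mem ?_ (pyRange_pairwise 1 _)
    intro d d' hd hd' hlt
    intro num hnum hnum'
    rw [PySem.List.mem_pyRange_one] at hd hd'
    obtain ⟨-, -, -, hlen⟩ := gen1_unpack low high d num hd.1 hnum
    obtain ⟨-, -, -, hlen'⟩ := gen1_unpack low high d' num hd'.1 hnum'
    have : d.toNat = d'.toNat := by omega
    omega

theorem nodup_crux2 (low high : Int) :
    ((PySem.List.pyRange 2 (PySem.List.len (PySem.Int.toChars high) + 1) 1).flatMap (fun L =>
      ((PySem.List.pyRange 1 (PySem.Int.floordiv L 2 + 1) 1).filter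
          (fun d => PySem.Int.mod L d == 0)).flatMap
        (fun d => ((blocksB d).map (fun b => b * repB L d)).filter
          (fun num => (decide (low ≤ num) && decide (num ≤ high)) &&
            ((PySem.List.pyRange 1 d 1).filter (fun q => PySem.Int.mod L q == 0)).all
              (fun q => (PySem.Int.mod num (repB L q) != 0) ||
                decide (PySem.Int.floordiv num (repB L q) < 10 ^ (q.toNat - 1))))))).Nodup := by
  rw [List.flatMap_def, List.nodup_flatten]
  constructor
  · intro l hl
    rw [List.mem_map] at hl
    obtain ⟨L, hLmem, rfl⟩ := hl
    rw [PySem.List.mem_pyRange_one] at hLmem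
    rw [List.flatMap_def, List.nodup_flatten]
    constructor
    · intro l2 hl2
      rw [List.mem_map] at hl2
      obtain ⟨d, hdmem, rfl⟩ := hl2
      rw [List.mem_filter, PySem.List.mem_pyRange_one] at hdmem
      have hdvd' : PySem.Int.mod L d = 0 := by simpa using hdmem.2
      apply List.Nodup.filter
      apply List.Nodup.map_on
      · intro b hb b' hb' he
        have hp : 0 < repB L d := repB_pos' L d hLmem.1 hdmem.1.1 hdvd'
        exact mul_right_cancel₀ (by omega) he
      · exact (pyRange_pairwise _ _).imp (fun {a b} => ne_of_lt)
    · rw [List.pairwise_map]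
      apply List.Pairwise.imp_of_mem ?_ ((pyRange_pairwise 1 _).filter _)
      intro d d' hdm hdm' hlt num hnum hnum'
      rw [List.mem_filter, PySem.List.mem_pyRange_one] at hdm hdm'
      have hdvd1 : PySem.Int.mod L d = 0 := by simpa using hdm.2
      rw [List.mem_filter] at hnum hnum'
      obtain ⟨hpos, -, hlen1, hsh1⟩ :=
        gen2_unpack L d num hLmem.1 hdm.1.1 (by omega) hdvd1 hnum.1
      simp only [Bool.and_eq_true, List.all_eq_true] at hnum'
      have hdin : d ∈ (PySem.List.pyRange 1 d' 1).filter (fun q => PySem.Int.mod L q == 0) := by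
        rw [List.mem_filter, PySem.List.mem_pyRange_one]
        exact ⟨⟨hdm.1.1, hlt⟩, by simp [hdvd1]⟩
      have htest := hnum'.2.2 d hdin
      have hiff := test_false_iff num L d hdm.1.1 hpos
        ((PySem.Int.mod_eq_zero_iff_dvd _ _).mp hdvd1) hLmem.1 hlen1
      have hcontra := hiff.mpr hsh1
      rw [htest] at hcontra
      exact Bool.noConfusion hcontra
  · rw [List.pairwise_map]
    apply List.Pairwise.imp_of_mem ?_ (pyRange_pairwise 2 _)
    intro L L' hLm hLm' hlt num hnum hnum'
    rw [PySem.List.mem_pyRange_one] at hLm hLm'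
    rw [List.mem_flatMap] at hnum hnum'
    obtain ⟨d, hdmem, hnum⟩ := hnum
    obtain ⟨d2, hdmem2, hnum'⟩ := hnum'
    rw [List.mem_filter, PySem.List.mem_pyRange_one] at hdmem hdmem2
    rw [List.mem_filter] at hnum hnum'
    obtain ⟨-, -, hlen1, -⟩ := gen2_unpack L d num hLm.1 hdmem.1.1
      (by omega) (by simpa using hdmem.2) hnum.1
    obtain ⟨-, -, hlen2, -⟩ := gen2_unpack L' d2 num hLm'.1 hdmem2.1.1
      (by omega) (by simpa using hdmem2.2) hnum'.1
    omega

-- ===== VERDICT (by name: the statement is the Claim_ definition above) =====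
theorem process_interval_spec : Claim_equal_process_interval := by
  intro low high _
  show process_interval low high = process_interval_alt low high
  unfold process_interval process_interval_alt
  rw [fold_pair_eq]
  have nodupA : (PySem.List.pyRange low (high+1) 1).Nodup :=
    (pyRange_pairwise low (high+1)).imp (fun {a b} => ne_of_lt)
  have h1 : ((PySem.List.pyRange low (high+1) 1).filter
      (fun num => check_invalid (PySem.Int.toChars num))).sum
      = ((PySem.List.pyRange 1 (PySem.Int.floordiv (PySem.List.len (PySem.Int.toChars high)) 2 + 1) 1).flatMap (fun d =>
      ((blocksB d).map (fun b => b * repB (2*d) d)).filter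
        (fun num => decide (low ≤ num) && decide (num ≤ high)))).sum := by
    apply List.Perm.sum_eq
    rw [List.perm_ext_iff_of_nodup (nodupA.filter _) (nodup_crux1 low high)]
    intro x
    rw [mem_crux1, List.mem_filter, PySem.List.mem_pyRange_one]
    tauto
  have h2 : ((PySem.List.pyRange low (high+1) 1).filter
      (fun num => check_invalid2 (PySem.Int.toChars num))).sum
      = ((PySem.List.pyRange 2 (PySem.List.len (PySem.Int.toChars high) + 1) 1).flatMap (fun L =>
      ((PySem.List.pyRange 1 (PySem.Int.floordiv L 2 + 1) 1).filter
          (fun d => PySem.Int.mod L d == 0)).flatMap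
        (fun d => ((blocksB d).map (fun b => b * repB L d)).filter
          (fun num => (decide (low ≤ num) && decide (num ≤ high)) &&
            ((PySem.List.pyRange 1 d 1).filter (fun q => PySem.Int.mod L q == 0)).all
              (fun q => (PySem.Int.mod num (repB L q) != 0) ||
                decide (PySem.Int.floordiv num (repB L q) < 10 ^ (q.toNat - 1))))))).sum := by
    apply List.Perm.sum_eq
    rw [List.perm_ext_iff_of_nodup (nodupA.filter _) (nodup_crux2 low high)]
    intro x
    rw [mem_crux2 low high x, List.mem_filter, PySem.List.mem_pyRange_one]
    tauto
  simp only [zero_add] at *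
  rw [h1, h2]
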